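-- pv_equiv track=rewrite | github.com/DangKhoi14/HRK-Prob.Solv-using-Python | Equalize_the_Array.py | equalizeArray
-- ===== SOURCE A (Python) =====
-- def equalizeArray(arr):
--     element_count = {}
--     for element in arr:
--         if element in element_count:
--             element_count[element] += 1
--         else:
--             element_count[element] = 1
--
--     chossen_value = max(element_count, key=element_count.get)
--     filtered_array = [element for element in arr if element != chossen_value]
--
--     return len(filtered_array)
-- ===== SOURCE B (Python) =====
-- def equalizeArray(arr):
--     best = 0
--     run = 0
--     prev = None
--     for x in sorted(arr):
--         if x == prev:
--             run += 1
--         else: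
--             run = 1
--             prev = x
--         if run > best:
--             best = run
--     return len(arr) - best
-- ===== Notes on version B (the rewrite author's own statement) =====
-- stated objective: alternative
-- what changed: B builds no frequency table: it sorts the array and makes one scan for the longest run of equal elements, returning len(arr) minus that run length, instead of A's dict counting + argmax key + second filtering pass.
import Mathlib
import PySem

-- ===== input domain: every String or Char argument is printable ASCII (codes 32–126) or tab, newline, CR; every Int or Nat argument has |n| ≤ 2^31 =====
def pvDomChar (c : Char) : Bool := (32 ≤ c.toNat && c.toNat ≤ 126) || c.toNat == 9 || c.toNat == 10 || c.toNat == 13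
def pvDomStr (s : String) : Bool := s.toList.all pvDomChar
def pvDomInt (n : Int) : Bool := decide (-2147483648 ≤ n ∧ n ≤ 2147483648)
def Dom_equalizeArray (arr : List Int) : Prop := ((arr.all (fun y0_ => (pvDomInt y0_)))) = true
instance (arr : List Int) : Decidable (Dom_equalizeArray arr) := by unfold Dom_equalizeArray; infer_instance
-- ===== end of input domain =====

-- B sorts the array and scans it once for the longest run of equal elements,
-- instead of A's dict counting + argmax key + filter pass (objective: alternative).

-- ===== PORT A =====
def equalizeArray (arr : List Int) : Int :=
  let element_count : PySem.Dict Int Int :=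
    arr.foldl (fun d e => if d.contains e then d.modify e 0 (fun v => v + 1) else d.insert e 1)
      PySem.Dict.empty
  match PySem.List.max? element_count.keys (fun k => element_count.getD k 0) with
  | none => 0   -- unreachable under Pre_ (Python: max() raises ValueError on empty dict)
  | some chossen_value =>
      let filtered_array := arr.filter (fun e => !(e == chossen_value))
      (filtered_array.length : Int)

-- ===== PORT B =====
-- B's loop body: update (best, run, prev) with the next element of the sorted list.
def ecStep (st : Int × Int × Option Int) (x : Int) : Int × Int × Option Int :=
  let rp := if some x = st.2.2 then (st.2.1 + 1, st.2.2) else (1, some x)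
  (if rp.1 > st.1 then rp.1 else st.1, rp.1, rp.2)

def equalizeArray_alt (arr : List Int) : Int :=
  (arr.length : Int) -
    ((PySem.List.sorted arr (fun x => x) false).foldl ecStep (0, 0, none)).1

-- ===== PRECONDITION & SPEC =====
-- Pre_ excludes only the empty list, on which Python A raises ValueError (max of an empty dict).
def Pre_equalizeArray (arr : List Int) : Prop := arr ≠ []
instance (arr : List Int) : Decidable (Pre_equalizeArray arr) := by unfold Pre_equalizeArray; infer_instance
def pvWitness_equalizeArray : List Int := ([3, 3, 2, 1, 3])

def Spec_equalizeArray (arr : List Int) (out : Int) : Prop := out = equalizeArray_alt arr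
instance (arr : List Int) (out : Int) : Decidable (Spec_equalizeArray arr out) := by unfold Spec_equalizeArray; infer_instance

-- ===== CLAIM (what is proved, stated in full; the proofs are below) =====
def Claim_equal_equalizeArray : Prop := ∀ (arr : List Int), Dom_equalizeArray arr → Pre_equalizeArray arr → Spec_equalizeArray arr (equalizeArray arr)

-- ===== LEMMAS AND PROOFS =====

lemma length_filter_ne (arr : List Int) (a : Int) :
    (arr.filter (fun e => !(e == a))).length = arr.length - arr.count a := by
  induction arr with
  | nil => rfl
  | cons x t ih =>
      by_cases h : x = a
      · subst h
        have hle : t.count x ≤ t.length := List.count_le_length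
        simp [ih]
      · have hle : t.count a ≤ t.length := List.count_le_length
        simp [h, ih]
        omega

-- A's counting loop builds exactly collections.Counter(arr).
lemma ecA_eq_counter (arr : List Int) :
    arr.foldl (fun d e => if d.contains e then d.modify e 0 (fun v => v + 1) else d.insert e 1)
      PySem.Dict.empty = PySem.Dict.counter arr := by
  rw [PySem.Dict.counter_eq_foldl]
  have hstep : (fun (d : PySem.Dict Int Int) (e : Int) =>
      if d.contains e then d.modify e 0 (fun v => v + 1) else d.insert e 1)
      = (fun (d : PySem.Dict Int Int) (e : Int) => d.modify e 0 (fun v => v + 1)) := by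
    funext d e
    by_cases h : d.contains e
    · simp [h]
    · have hnone : d.get? e = none :=
        (PySem.Dict.get?_eq_none_iff_contains d e).2 (by simpa using h)
      simp [h, PySem.Dict.modify, PySem.Dict.getD, hnone]
  rw [hstep]

lemma ecStep_eq (best run p : Int) :
    ecStep (best, run, some p) p = (if run + 1 > best then run + 1 else best, run + 1, some p) := by
  simp [ecStep]

lemma ecStep_ne (best run p x : Int) (h : x ≠ p) :
    ecStep (best, run, some p) x = (if 1 > best then 1 else best, 1, some x) := by
  simp [ecStep, h]

lemma count_single_self (x : Int) : List.count x [x] = 1 := by simp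

-- Scan invariant: over a sorted suffix s, with q ++ [p] already processed, best is the
-- largest multiplicity so far and run the multiplicity of p; the final best is the
-- largest multiplicity of the whole list, attained by some element.
lemma ecScan_inv :
    ∀ (s q : List Int) (p best run : Int),
      (q ++ p :: s).Pairwise (· ≤ ·) →
      run = ((q ++ [p]).count p : Int) →
      (∀ k ∈ q ++ [p], (((q ++ [p]).count k : Nat) : Int) ≤ best) →
      (∃ c ∈ q ++ [p], best = (((q ++ [p]).count c : Nat) : Int)) →
      (∀ k ∈ q ++ p :: s, (((q ++ p :: s).count k : Nat) : Int)
          ≤ (s.foldl ecStep (best, run, some p)).1) ∧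
      (∃ c ∈ q ++ p :: s, (s.foldl ecStep (best, run, some p)).1
          = (((q ++ p :: s).count c : Nat) : Int)) := by
  intro s
  induction s with
  | nil => intro q p best run _ _ hub hex; exact ⟨hub, hex⟩
  | cons x s' ih =>
      intro q p best run hpw hrun hub hex
      have hassoc : (q ++ [p]) ++ x :: s' = q ++ p :: x :: s' := by simp
      by_cases hxp : x = p
      · subst hxp
        rw [List.foldl_cons, ecStep_eq]
        have hcx : ((q ++ [x]) ++ [x]).count x = (q ++ [x]).count x + 1 := by
          rw [List.count_append, count_single_self]
        have ih' := ih (q ++ [x]) x (if run + 1 > best then run + 1 else best) (run + 1)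
          (by rw [hassoc]; exact hpw)
          (by rw [hcx]; push_cast; omega)
          (by
            intro k hk
            by_cases hkx : k = x
            · subst hkx
              rw [hcx]
              split_ifs with hgt <;> (push_cast; push_cast at hrun; omega)
            · have hk' : k ∈ q ++ [x] := by
                rcases List.mem_append.1 hk with h | h
                · exact h
                · simp at h; exact absurd h hkx
              have h0 : List.count k [x] = 0 := List.count_eq_zero.2 (by simp [hkx])
              have hcnt : ((q ++ [x]) ++ [x]).count k = (q ++ [x]).count k := by
                rw [List.count_append, h0]; omega
              have := hub k hk'
              rw [hcnt]
              split_ifs <;> omega)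
          (by
            split_ifs with hgt
            · refine ⟨x, by simp, ?_⟩
              rw [hcx]; push_cast; omega
            · obtain ⟨c, hc, hcbest⟩ := hex
              have hcx' : c ≠ x := by
                intro hcex
                subst hcex
                rw [← hrun] at hcbest
                omega
              refine ⟨c, List.mem_append_left _ hc, ?_⟩
              have h0 : List.count c [x] = 0 := List.count_eq_zero.2 (by simp [hcx'])
              rw [show ((q ++ [x]) ++ [x]).count c = (q ++ [x]).count c by
                rw [List.count_append, h0]; omega]
              exact hcbest)
        rw [hassoc] at ih'
        exact ih'
      · rw [List.foldl_cons, ecStep_ne _ _ _ _ hxp]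
        -- x does not occur in q ++ [p]: everything there is ≤ p ≤ x and x ≠ p
        have hx_notmem : x ∉ q ++ [p] := by
          rw [List.pairwise_append] at hpw
          obtain ⟨_, hps, hqall⟩ := hpw
          have hpx : p ≤ x := (List.pairwise_cons.1 hps).1 x (by simp)
          intro hmem
          rcases List.mem_append.1 hmem with h | h
          · have hxle : x ≤ p := hqall x h p (by simp)
            exact hxp (le_antisymm hxle hpx)
          · simp at h; exact hxp h
        have hcnt0 : (q ++ [p]).count x = 0 := List.count_eq_zero.2 hx_notmem
        have hassoc' : (q ++ [p]) ++ x :: s' = q ++ p :: x :: s' := hassoc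
        have ih' := ih (q ++ [p]) x (if 1 > best then 1 else best) 1
          (by rw [hassoc']; exact hpw)
          (by rw [List.count_append, hcnt0, count_single_self]; norm_num)
          (by
            intro k hk
            by_cases hkx : k = x
            · rw [hkx]
              rw [show ((q ++ [p]) ++ [x]).count x = 1 by
                rw [List.count_append, hcnt0, count_single_self]]
              split_ifs <;> omega
            · have hk' : k ∈ q ++ [p] := by
                rcases List.mem_append.1 hk with h | h
                · exact h
                · simp at h; exact absurd h hkx
              have := hub k hk'
              have h0 : List.count k [x] = 0 := List.count_eq_zero.2 (by simp [hkx])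
              rw [show ((q ++ [p]) ++ [x]).count k = (q ++ [p]).count k by
                rw [List.count_append, h0]; omega]
              split_ifs <;> omega
          )
          (by
            split_ifs with hgt
            · refine ⟨x, by simp, ?_⟩
              rw [show ((q ++ [p]) ++ [x]).count x = 1 by
                rw [List.count_append, hcnt0, count_single_self]]
              simp [hgt]
            · obtain ⟨c, hc, hcbest⟩ := hex
              have hcx' : c ≠ x := fun h => hx_notmem (h ▸ hc)
              refine ⟨c, List.mem_append_left _ hc, ?_⟩
              have h0 : List.count c [x] = 0 := List.count_eq_zero.2 (by simp [hcx'])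
              rw [show ((q ++ [p]) ++ [x]).count c = (q ++ [p]).count c by
                rw [List.count_append, h0]; omega]
              exact hcbest)
        rw [hassoc'] at ih'
        exact ih'

-- The scan over a nonempty sorted list returns the largest multiplicity.
lemma ecScan_spec (x : Int) (t : List Int) (hpw : (x :: t).Pairwise (· ≤ ·)) :
    (∀ k ∈ x :: t, (((x :: t).count k : Nat) : Int)
        ≤ ((x :: t).foldl ecStep (0, 0, none)).1) ∧
    (∃ c ∈ x :: t, ((x :: t).foldl ecStep (0, 0, none)).1
        = (((x :: t).count c : Nat) : Int)) := by
  have hfirst : ecStep (0, 0, none) x = (1, 1, some x) := by simp [ecStep]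
  rw [List.foldl_cons, hfirst]
  have := ecScan_inv t [] x 1 1 (by simpa using hpw)
    (by simp) (by intro k hk; simp at hk; simp [hk])
    ⟨x, by simp, by simp⟩
  simpa using this

-- ===== VERDICT (by name: the statement is the Claim_ definition above) =====
theorem equalizeArray_spec : Claim_equal_equalizeArray := by
  intro arr _ hpre
  unfold Spec_equalizeArray equalizeArray equalizeArray_alt
  simp only [ecA_eq_counter]
  have hkeys : (PySem.Dict.counter arr).keys = PySem.Set.ofList arr :=
    PySem.Dict.keys_counter arr
  have hne : PySem.Set.ofList arr ≠ [] := by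
    intro h0
    cases arr with
    | nil => exact hpre rfl
    | cons x t =>
        have : x ∈ PySem.Set.ofList (x :: t) :=
          (PySem.Set.mem_ofList _ _).2 (List.mem_cons_self)
        rw [h0] at this
        exact absurd this (List.not_mem_nil)
  obtain ⟨chosen, hch⟩ : ∃ c, PySem.List.max? (PySem.Dict.counter arr).keys
      (fun k => (PySem.Dict.counter arr).getD k 0) = some c := by
    rcases h : PySem.List.max? (PySem.Dict.counter arr).keys
        (fun k => (PySem.Dict.counter arr).getD k 0) with _ | c
    · exact absurd ((PySem.List.max?_eq_none_iff _ _).1 h) (by rw [hkeys]; exact hne)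
    · exact ⟨c, rfl⟩
  rw [hch]
  -- chosen's multiplicity is maximal in arr
  have hch_mem : chosen ∈ arr := by
    have := PySem.List.max?_mem hch
    rw [hkeys] at this
    exact (PySem.Set.mem_ofList _ _).1 this
  have hmax : ∀ k ∈ arr, (arr.count k : Int) ≤ (arr.count chosen : Int) := by
    intro k hk
    have := PySem.List.max?_isMax hch k (by rw [hkeys]; exact (PySem.Set.mem_ofList _ _).2 hk)
    rwa [PySem.Dict.getD_counter, PySem.Dict.getD_counter] at this
  -- B's scan over the sorted copy computes exactly chosen's multiplicity
  have hperm : (PySem.List.sorted arr (fun x => x) false).Perm arr :=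
    PySem.List.sorted_perm arr (fun x => x) false
  obtain ⟨y, u, hsY⟩ : ∃ y u, PySem.List.sorted arr (fun x => x) false = y :: u := by
    rcases hs : PySem.List.sorted arr (fun x => x) false with _ | ⟨y, u⟩
    · exact absurd (by have h2 := hperm; rw [hs] at h2; exact h2.symm.eq_nil) hpre
    · exact ⟨y, u, rfl⟩
  have hpw : (y :: u).Pairwise (· ≤ ·) := by
    have := PySem.List.sorted_pairwise arr (fun x => x)
    rw [hsY] at this
    exact this
  have hscan := ecScan_spec y u hpw
  rw [hsY] at hperm
  have hloop : ((y :: u).foldl ecStep (0, 0, none)).1 = (arr.count chosen : Int) := by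
    obtain ⟨hub, c, hc, hcv⟩ := hscan
    have h1 : (arr.count chosen : Int) ≤ ((y :: u).foldl ecStep (0, 0, none)).1 := by
      have := hub chosen (hperm.mem_iff.2 hch_mem)
      rwa [hperm.count_eq] at this
    have h2 := hmax c (hperm.mem_iff.1 hc)
    rw [hperm.count_eq] at hcv
    omega
  show ((arr.filter (fun e => !(e == chosen))).length : Int)
      = (arr.length : Int) - ((PySem.List.sorted arr (fun x => x) false).foldl ecStep (0, 0, none)).1
  rw [hsY, hloop, length_filter_ne]
  have hle : arr.count chosen ≤ arr.length := List.count_le_length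
  omega
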